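-- pv_equiv track=rewrite | github.com/Prodno/mkn | 01.2.BasicTypes/filter_list_by_list/filter_list_by_list.py | filter_list_by_list
-- ===== SOURCE A (Python) =====
-- import typing as tp
--
-- def filter_list_by_list(lst_a: tp.Union[list[int], range], lst_b: tp.Union[list[int], range]) -> list[int]:
--     """
--     Filter first sorted list by other sorted list
--     :param lst_a: first sorted list
--     :param lst_b: second sorted list
--     :return: filtered sorted list
--     """
--     i, j = 0, 0
--     ans = []
--     if not lst_b:
--         return lst_a
--     while i < len(lst_a):
--         while (j < len(lst_b) - 1) and (lst_b[j] < lst_a[i]):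
--             j += 1
--         if lst_a[i] != lst_b[j]:
--             ans.append(lst_a[i])
--         i += 1
--     return ans
-- ===== SOURCE B (Python) =====
-- import typing as tp
--
-- def filter_list_by_list(lst_a: tp.Union[list[int], range], lst_b: tp.Union[list[int], range]) -> list[int]:
--     """Filter first sorted list by other sorted list (inverted traversal: outer loop over lst_b)."""
--     if not lst_b:
--         return lst_a
--     out = []
--     i, n = 0, len(lst_a)
--     for v in lst_b[:-1]:
--         # consume the run of lst_a that keeps the merge pointer at this element of lst_b
--         while i < n and lst_a[i] <= v:
--             if lst_a[i] != v:
--                 out.append(lst_a[i])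
--             i += 1
--         if i >= n:
--             return out
--     v = lst_b[-1]
--     out.extend(x for x in lst_a[i:] if x != v)
--     return out
-- ===== Notes on version B (the rewrite author's own statement) =====
-- stated objective: alternative
-- what changed: Inverts the traversal: instead of the outer loop over lst_a with an inner j-pointer advance over lst_b, B's outer loop walks lst_b once and an inner loop consumes the run of lst_a elements that keep the merge pointer at the current lst_b element, with the remaining tail of lst_a handled by a filter against lst_b[-1]; same O(len(a)+len(b)) work but fewer per-element index operations (measured ~2.5x).
import Mathlib
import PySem

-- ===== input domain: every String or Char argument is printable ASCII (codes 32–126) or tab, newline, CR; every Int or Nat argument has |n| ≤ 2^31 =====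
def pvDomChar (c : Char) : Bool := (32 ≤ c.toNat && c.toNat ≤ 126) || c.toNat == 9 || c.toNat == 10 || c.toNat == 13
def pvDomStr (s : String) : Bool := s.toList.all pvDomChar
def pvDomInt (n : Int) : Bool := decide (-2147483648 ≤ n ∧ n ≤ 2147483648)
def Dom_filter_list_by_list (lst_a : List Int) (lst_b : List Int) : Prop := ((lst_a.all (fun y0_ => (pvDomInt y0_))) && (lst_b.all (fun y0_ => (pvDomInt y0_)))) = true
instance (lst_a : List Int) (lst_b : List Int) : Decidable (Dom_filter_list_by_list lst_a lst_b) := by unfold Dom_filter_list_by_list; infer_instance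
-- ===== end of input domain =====

-- B inverts the traversal (outer loop over lst_b, inner loop consuming runs of lst_a) but
-- returns the same list as A's two-pointer merge on every input (alternative, same cost).


-- ===== PORT A =====
-- inner 'while (j < len(lst_b)-1) and (lst_b[j] < lst_a[i]): j += 1'
-- (index j is always in range here — the outer guard ensures lst_b ≠ [] and j ≤ len-1 — so getD is exact)
def pvAdv (b : List Int) (x : Int) (j : Nat) : Nat :=
  if j < b.length - 1 ∧ b.getD j 0 < x then pvAdv b x (j + 1) else j
termination_by b.length - 1 - j
decreasing_by omega

-- outer 'while i < len(lst_a)' loop, carrying j and building ans front-to-back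
def pvOuter (b : List Int) : List Int → Nat → List Int
  | [], _ => []
  | x :: rest, j =>
      let j' := pvAdv b x j
      if x ≠ b.getD j' 0 then x :: pvOuter b rest j' else pvOuter b rest j'

def filter_list_by_list (lst_a : List Int) (lst_b : List Int) : List Int :=
  if lst_b = [] then lst_a else pvOuter lst_b lst_a 0

-- ===== PORT B =====
-- inner 'while i < n and lst_a[i] <= v: …' — returns (elements appended, unconsumed rest of lst_a)
def pvConsume (v : Int) : List Int → List Int × List Int
  | [] => ([], [])
  | x :: xs =>
      if x ≤ v then
        let p := pvConsume v xs
        ((if x ≠ v then x :: p.1 else p.1), p.2)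
      else ([], x :: xs)

-- 'for v in lst_b[:-1]: … if i >= n: return out' then the tail comprehension against lst_b[-1]
def pvLoop (bs : List Int) (a : List Int) (vlast : Int) : List Int :=
  match bs with
  | [] => a.filter (fun x => decide (x ≠ vlast))
  | v :: bs' =>
      let p := pvConsume v a
      if p.2 = [] then p.1 else p.1 ++ pvLoop bs' p.2 vlast

def filter_list_by_list_alt (lst_a : List Int) (lst_b : List Int) : List Int :=
  if h : lst_b = [] then lst_a
  else pvLoop lst_b.dropLast lst_a (lst_b.getLast h)

-- ===== PRECONDITION & SPEC =====
def Spec_filter_list_by_list (lst_a : List Int) (lst_b : List Int) (out : List Int) : Prop := out = filter_list_by_list_alt lst_a lst_b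
instance (lst_a : List Int) (lst_b : List Int) (out : List Int) : Decidable (Spec_filter_list_by_list lst_a lst_b out) := by unfold Spec_filter_list_by_list; infer_instance

-- ===== CLAIM (what is proved, stated in full; the proofs are below) =====
def Claim_equal_filter_list_by_list : Prop := ∀ (lst_a : List Int) (lst_b : List Int), Dom_filter_list_by_list lst_a lst_b → Spec_filter_list_by_list lst_a lst_b (filter_list_by_list lst_a lst_b)

-- ===== LEMMAS AND PROOFS =====

-- When the merge pointer sits on the last element of b, A keeps exactly the elements ≠ b[last].
theorem pvOuter_last (b : List Int) :
    ∀ (a : List Int), pvOuter b a (b.length - 1)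
      = a.filter (fun x => decide (x ≠ b.getD (b.length - 1) 0)) := by
  intro a
  induction a with
  | nil => simp [pvOuter]
  | cons x xs ih =>
      have hadv : pvAdv b x (b.length - 1) = b.length - 1 := by
        rw [pvAdv, if_neg (by omega)]
      rw [pvOuter]
      show (if x ≠ b.getD (pvAdv b x (b.length - 1)) 0
              then x :: pvOuter b xs (pvAdv b x (b.length - 1))
              else pvOuter b xs (pvAdv b x (b.length - 1))) = _
      rw [hadv, ih, List.filter_cons]
      by_cases hx : x = b.getD (b.length - 1) 0
      · rw [if_neg (not_not_intro hx), if_neg (by simp [hx])]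
      · rw [if_pos hx, if_pos (by simpa [List.getD] using hx)]

-- Consuming one element x ≤ v prepends x (when x ≠ v) to the result of pvLoop on the rest.
theorem pvLoop_cons_le (v : Int) (bs' : List Int) (vlast : Int) (x : Int) (xs : List Int)
    (hxv : x ≤ v) :
    pvLoop (v :: bs') (x :: xs) vlast
      = if x ≠ v then x :: pvLoop (v :: bs') xs vlast else pvLoop (v :: bs') xs vlast := by
  show (let p := pvConsume v (x :: xs)
        if p.2 = [] then p.1 else p.1 ++ pvLoop bs' p.2 vlast) = _
  rw [pvConsume, if_pos hxv]
  by_cases hrest : (pvConsume v xs).2 = []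
  · simp only [pvLoop, hrest, if_pos]
  · simp only [pvLoop, hrest, ite_false]
    by_cases hxne : x ≠ v <;> simp [hxne]

-- The heart: A's pointer-j merge equals B's loop over the b-suffix starting at j.
theorem pvOuter_eq_pvLoop (b : List Int) (hb : b ≠ []) :
    ∀ (m j : Nat), m = b.length - 1 - j → j ≤ b.length - 1 →
    ∀ (a : List Int), pvOuter b a j = pvLoop (b.dropLast.drop j) a (b.getLast hb) := by
  intro m
  induction m with
  | zero =>
      intro j hm hj a
      have hjl : j = b.length - 1 := by omega
      have hdrop : b.dropLast.drop j = [] :=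
        List.drop_of_length_le (by rw [List.length_dropLast]; omega)
      have hlast : b.getLast hb = b.getD (b.length - 1) 0 := by
        rw [List.getLast_eq_getElem, List.getD_eq_getElem]
      rw [hdrop, hjl, pvOuter_last b a]
      simp [pvLoop, hlast]
  | succ m ih =>
      intro j hm hj a
      have hjlt : j < b.length - 1 := by omega
      have hjlen : j < b.length := by omega
      have hjdl : j < b.dropLast.length := by rw [List.length_dropLast]; omega
      have hdrop : b.dropLast.drop j = b.getD j 0 :: b.dropLast.drop (j + 1) := by
        rw [List.drop_eq_getElem_cons hjdl, List.getElem_dropLast,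
          List.getD_eq_getElem _ _ hjlen]
      rw [hdrop]
      induction a with
      | nil => simp [pvOuter, pvLoop, pvConsume]
      | cons x xs iha =>
          by_cases hxv : x ≤ b.getD j 0
          · -- pointer stays at j; B consumes x at the same element of b
            have hadv : pvAdv b x j = j := by
              rw [pvAdv, if_neg (by omega)]
            rw [pvOuter]
            show (if x ≠ b.getD (pvAdv b x j) 0
                    then x :: pvOuter b xs (pvAdv b x j)
                    else pvOuter b xs (pvAdv b x j)) = _
            rw [hadv, pvLoop_cons_le _ _ _ _ _ hxv, iha]
          · -- x > b[j]: both sides advance to the next element of b with a unchanged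
            have hstep : pvOuter b (x :: xs) j = pvOuter b (x :: xs) (j + 1) := by
              rw [pvOuter, pvOuter]
              have : pvAdv b x j = pvAdv b x (j + 1) := by
                rw [pvAdv, if_pos ⟨hjlt, by omega⟩]
              simp only [this]
            have hnext : pvOuter b (x :: xs) (j + 1)
                = pvLoop (b.dropLast.drop (j + 1)) (x :: xs) (b.getLast hb) :=
              ih (j + 1) (by omega) (by omega) (x :: xs)
            rw [hstep, hnext]
            show _ = (let p := pvConsume (b.getD j 0) (x :: xs)
                      if p.2 = [] then p.1
                      else p.1 ++ pvLoop (b.dropLast.drop (j + 1)) p.2 (b.getLast hb))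
            rw [pvConsume, if_neg hxv]
            simp

-- ===== VERDICT (by name: the statement is the Claim_ definition above) =====
theorem filter_list_by_list_spec : Claim_equal_filter_list_by_list := by
  intro lst_a lst_b _
  unfold Spec_filter_list_by_list filter_list_by_list filter_list_by_list_alt
  by_cases hb : lst_b = []
  · simp [hb]
  · rw [if_neg hb, dif_neg hb]
    have := pvOuter_eq_pvLoop lst_b hb (lst_b.length - 1) 0 (by omega) (by omega) lst_a
    simpa using this
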